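-- pv_equiv track=rewrite | github.com/joeldick/chessgames-scraper | cgcom_scraper.py | clean_pgn
-- ===== SOURCE A (Python) =====
-- def clean_pgn(pgn):
--     # Strip leading/trailing spaces from each line and remove blank lines between tags
--     lines = [line.strip() for line in pgn.strip().splitlines()]
--
--     cleaned_lines = []
--     in_tags = True
--     for line in lines:
--         if in_tags:
--             if line.startswith('['):
--                 cleaned_lines.append(line)
--             elif line == '':
--                 # ignore blank lines within tag section
--                 continue
--             else:
--                 # Start of moves
--                 in_tags = False
--                 if cleaned_lines and cleaned_lines[-1] != '':
--                     cleaned_lines.append('')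
--                 cleaned_lines.append(line)
--         else:
--             if line != '':
--                 cleaned_lines.append(line)
--
--     return "\n".join(cleaned_lines).strip()
-- ===== SOURCE B (Python) =====
-- def clean_pgn(pgn):
--     # Different decomposition: split once at the first non-empty non-'[' line,
--     # then filter the two halves and assemble with a single separator.
--     lines = [l.strip() for l in pgn.strip().splitlines()]
--     split = len(lines)
--     for i, l in enumerate(lines):
--         if l != '' and not l.startswith('['):
--             split = i
--             break
--     tag_lines = [l for l in lines[:split] if l.startswith('[')]
--     move_lines = [l for l in lines[split:] if l != '']
--     result = tag_lines + ([''] if tag_lines and move_lines else []) + move_lines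
--     return "\n".join(result).strip()
-- ===== Notes on version B (the rewrite author's own statement) =====
-- stated objective: simpler
-- what changed: Replaces A's stateful two-mode loop (in_tags flag, conditional separator insertion mid-loop) by finding the single split index between tag section and moves, filtering each half independently, and assembling tags + optional blank separator + moves.
import Mathlib
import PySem

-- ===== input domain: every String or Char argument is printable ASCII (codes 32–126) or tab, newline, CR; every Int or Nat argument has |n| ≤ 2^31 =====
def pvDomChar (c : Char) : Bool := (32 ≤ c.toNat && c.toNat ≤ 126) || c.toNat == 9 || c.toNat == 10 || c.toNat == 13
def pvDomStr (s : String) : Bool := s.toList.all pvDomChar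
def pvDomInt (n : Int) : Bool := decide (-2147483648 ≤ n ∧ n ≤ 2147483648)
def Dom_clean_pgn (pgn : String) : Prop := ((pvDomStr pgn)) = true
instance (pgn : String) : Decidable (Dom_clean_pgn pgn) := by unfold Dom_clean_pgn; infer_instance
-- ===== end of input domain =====

-- B replaces A's stateful two-mode loop by a single split point plus two filters (same cost, simpler decomposition).

-- ===== PORT A =====
-- A's for-loop over lines, carrying the state (cleaned_lines, in_tags)
def cleanLoop : List String → List String → Bool → List String
  | [], acc, _ => acc
  | l :: rest, acc, true =>
    if PySem.Str.startswith l "[" then cleanLoop rest (acc ++ [l]) true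
    else if l == "" then cleanLoop rest acc true
    else
      cleanLoop rest
        ((match acc.getLast? with   -- ‘cleaned_lines and cleaned_lines[-1] != ""’
          | some last => if last != "" then acc ++ [""] else acc
          | none => acc) ++ [l]) false
  | l :: rest, acc, false =>
    if l != "" then cleanLoop rest (acc ++ [l]) false else cleanLoop rest acc false

def clean_pgn (pgn : String) : String :=
  let lines := (PySem.Str.splitlines (PySem.Str.strip pgn)).map PySem.Str.strip
  PySem.Str.strip (PySem.Str.join "\n" (cleanLoop lines [] true))

-- ===== PORT B =====
-- B's break-loop: index of the first stripped line that is non-empty and does not start with '['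
def findSplit : List String → Nat
  | [] => 0
  | l :: rest =>
    if l != "" && !PySem.Str.startswith l "[" then 0 else findSplit rest + 1

def clean_pgn_alt (pgn : String) : String :=
  let lines := (PySem.Str.splitlines (PySem.Str.strip pgn)).map PySem.Str.strip
  let split := findSplit lines
  let tag := (lines.take split).filter (fun l => PySem.Str.startswith l "[")
  let mv := (lines.drop split).filter (fun l => l != "")
  let result := tag ++ (if tag ≠ [] ∧ mv ≠ [] then [""] else []) ++ mv
  PySem.Str.strip (PySem.Str.join "\n" result)

-- ===== PRECONDITION & SPEC =====
def Spec_clean_pgn (pgn : String) (out : String) : Prop := out = clean_pgn_alt pgn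
instance (pgn : String) (out : String) : Decidable (Spec_clean_pgn pgn out) := by unfold Spec_clean_pgn; infer_instance

-- ===== CLAIM (what is proved, stated in full; the proofs are below) =====
def Claim_equal_clean_pgn : Prop := ∀ (pgn : String), Dom_clean_pgn pgn → Spec_clean_pgn pgn (clean_pgn pgn)

-- ===== LEMMAS AND PROOFS =====

-- B's break-index cuts the list exactly where takeWhile/dropWhile on the tag-section predicate do
lemma take_findSplit (ls : List String) :
    ls.take (findSplit ls) = ls.takeWhile (fun l => l == "" || PySem.Str.startswith l "[") := by
  induction ls with
  | nil => rfl
  | cons l rest ih =>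
    by_cases he : l = "" <;> by_cases hs : PySem.Chars.startswith l.toList ['['] = true <;>
      simp [findSplit, he, hs, ih]

lemma drop_findSplit (ls : List String) :
    ls.drop (findSplit ls) = ls.dropWhile (fun l => l == "" || PySem.Str.startswith l "[") := by
  induction ls with
  | nil => rfl
  | cons l rest ih =>
    by_cases he : l = "" <;> by_cases hs : PySem.Chars.startswith l.toList ['['] = true <;>
      simp [findSplit, he, hs, ih]

-- A's loop after leaving the tag section only appends the non-empty lines
lemma loop_moves (ls : List String) (acc : List String) :
    cleanLoop ls acc false = acc ++ ls.filter (fun l => l != "") := by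
  induction ls generalizing acc with
  | nil => simp [cleanLoop]
  | cons l rest ih =>
    by_cases he : l = "" <;> simp [cleanLoop, he, ih]

lemma startswith_ne_empty (l : String) (h : PySem.Chars.startswith l.toList ['['] = true) :
    l ≠ "" := by
  intro hemp; subst hemp; exact absurd h (by decide)

-- A's loop in tag mode, with every accumulated line starting with '[', produces B's assembly
lemma loop_tags (ls : List String) (acc : List String)
    (h : ∀ l ∈ acc, PySem.Chars.startswith l.toList ['['] = true) :
    cleanLoop ls acc true =
      (acc ++ (ls.takeWhile (fun l => l == "" || PySem.Str.startswith l "[")).filter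
          (fun l => PySem.Str.startswith l "[")) ++
      (if (acc ++ (ls.takeWhile (fun l => l == "" || PySem.Str.startswith l "[")).filter
          (fun l => PySem.Str.startswith l "[")) ≠ [] ∧
          (ls.dropWhile (fun l => l == "" || PySem.Str.startswith l "[")).filter
          (fun l => l != "") ≠ [] then [""] else []) ++
      (ls.dropWhile (fun l => l == "" || PySem.Str.startswith l "[")).filter
          (fun l => l != "") := by
  induction ls generalizing acc with
  | nil => simp [cleanLoop]
  | cons l rest ih =>
    by_cases hs : PySem.Chars.startswith l.toList ['['] = true
    · have h' : ∀ x ∈ acc ++ [l], PySem.Chars.startswith x.toList ['['] = true := by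
        intro x hx; rcases List.mem_append.1 hx with hx | hx
        · exact h x hx
        · simp at hx; subst hx; exact hs
      simp [cleanLoop, hs, ih (acc ++ [l]) h']
    · by_cases he : l = ""
      · simp [cleanLoop, he, ih acc h, PySem.Chars.startswith]
      · rw [show cleanLoop (l :: rest) acc true =
          cleanLoop rest
            ((match acc.getLast? with
              | some last => if last != "" then acc ++ [""] else acc
              | none => acc) ++ [l]) false from by simp [cleanLoop, hs, he]]
        rw [loop_moves]
        cases hacc : acc.getLast? with
        | none =>
          have : acc = [] := List.getLast?_eq_none_iff.1 hacc
          subst this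
          simp [hs, he]
        | some last =>
          have hmem : last ∈ acc := List.mem_of_getLast? hacc
          have hne : acc ≠ [] := by rintro rfl; simp at hacc
          have hlast : last ≠ "" := startswith_ne_empty last (h last hmem)
          simp [hs, he, hlast, hne]

-- ===== VERDICT (by name: the statement is the Claim_ definition above) =====
theorem clean_pgn_spec : Claim_equal_clean_pgn := by
  intro pgn _
  unfold Spec_clean_pgn clean_pgn clean_pgn_alt
  simp only [take_findSplit, drop_findSplit, loop_tags _ [] (by simp)]
  simp
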